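-- pv_equiv track=rewrite | github.com/std-modelware/polytech-diskrete-2020 | Kostina_Nadia/symmetry.py | symmetry
-- ===== SOURCE A (Python) =====
-- def vertex_sym(s, i):
--     left = s + s[:i]
--     right = s[i + 1:] + s
--     zp = zip(left[::-1], right)
--     a, b = zip(*zp)
--     return a == b
--
-- def edge_sym(s, i, after_index=False):
--
--     if after_index:
--         if i == len(s) - 1:
--             i = 0
--         else:
--             i += 1
--
--     left = s + s[:i]
--     right = s[i:] + s
--     zp = zip(left[::-1], right)
--     a, b = zip(*zp)
--     return a == b
--
-- def symmetry(s):
--     res = 0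
--     n = len(s)
--
--     # Вершина ребро
--     class1 = []
--     # Вершина вершина
--     class2 = []
--     # Ребро ребро
--     class3 = []
--
--     if n % 2 == 1:
--         for i, ch in enumerate(s):
--             if vertex_sym(s, i):
--                 res += 1
--                 j = (i + n // 2 + 1) % n
--                 if j < i:
--                     class1.append(s[:j] + '|' + s[j:i] + '(' + ch + ')' + s[i + 1:])
--                 else:
--                     class1.append(s[:i] + '(' + ch + ')' + s[i + 1: j] + '|' + s[j:])
--
--     else:
--         for i in range(n//2):
--
--             i1 = (i + n // 2) % n
--             i2 = i
--
--             if i1 > i2: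
--                 i1, i2 = i2, i1
--
--             if vertex_sym(s, i):
--                 res += 1
--                 class2.append(s[:i1] + '(' + s[i1] + ')' + s[i1 + 1:i2] + '(' + s[i2] + ')' + s[i2 + 1:])
--
--             if edge_sym(s, i):
--                 res += 1
--                 class3.append(s[:i1] + '|' + s[i1:i2] + '|' + s[i2:])
--
--     return res, class1, class2, class3
-- ===== SOURCE B (Python) =====
-- def symmetry(s):
--     # Substring method: axis t is a reflection symmetry iff reversed(s) occurs
--     # in the doubled string s+s at offset (t+1) % m; precompute all offsets once,
--     # then select the hits by staged filter/map passes instead of one fold.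
--     m = len(s)
--     d = s + s
--     rev = s[::-1]
--     occ = [d[k:k + m] == rev for k in range(m)]
--
--     if m % 2 == 1:
--         hits = [k for k in range(m) if occ[(2 * k + 1) % m]]
--         class1 = []
--         for k in hits:
--             c = (k + m // 2 + 1) % m
--             if c < k:
--                 class1.append(s[:c] + '|' + s[c:k] + '(' + s[k] + ')' + s[k + 1:])
--             else:
--                 class1.append(s[:k] + '(' + s[k] + ')' + s[k + 1:c] + '|' + s[c:])
--         return len(hits), class1, [], []
--
--     half = m // 2
--     vhits = [k for k in range(half) if occ[(2 * k + 1) % m]]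
--     ehits = [k for k in range(half) if occ[(2 * k) % m]]
--     class2 = [s[:k] + '(' + s[k] + ')' + s[k + 1:k + half] + '(' + s[k + half] + ')' + s[k + half + 1:]
--               for k in vhits]
--     class3 = [s[:k] + '|' + s[k:k + half] + '|' + s[k + half:] for k in ehits]
--     return len(vhits) + len(ehits), [], class2, class3
-- ===== Notes on version B (the rewrite author's own statement) =====
-- stated objective: faster
-- what changed: B precomputes, once, at which offsets the reversed string occurs in the doubled string s+s (one slice comparison per offset), and then selects the symmetry axes by staged filter/map passes over that table, instead of A's single fold that builds, reverses and zips two fresh concatenated strings for every candidate axis.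
import Mathlib
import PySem

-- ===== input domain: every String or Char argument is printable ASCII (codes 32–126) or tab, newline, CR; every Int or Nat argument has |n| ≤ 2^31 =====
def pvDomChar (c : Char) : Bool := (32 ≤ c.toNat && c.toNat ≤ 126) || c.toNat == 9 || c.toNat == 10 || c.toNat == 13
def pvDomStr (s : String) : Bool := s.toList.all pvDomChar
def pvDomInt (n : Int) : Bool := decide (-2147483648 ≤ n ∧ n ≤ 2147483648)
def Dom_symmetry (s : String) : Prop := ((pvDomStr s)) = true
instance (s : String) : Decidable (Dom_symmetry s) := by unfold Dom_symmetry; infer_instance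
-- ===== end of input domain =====

-- B precomputes once at which offsets reversed(s) occurs in the doubled string s+s (one slice
-- comparison per offset) and selects the axes by staged filter/map passes over that table,
-- instead of A's single fold that reverses and zips fresh concatenated strings per axis.

-- ===== PORT A =====
-- Python's helpers take the string s; they are ported on s.toList (PySem string slicing is
-- defined on the code-point list). `left[::-1]` is list reversal; `zip(*zp)` is the pair of
-- projections of zp (zp is never empty at A's call sites, so no ValueError is reachable).

def vertex_sym (cs : List Char) (i : Int) : Bool :=
  let left := cs ++ PySem.List.slice cs none (some i)
  let right := PySem.List.slice cs (some (i + 1)) none ++ cs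
  let zp := left.reverse.zip right
  (zp.map Prod.fst) == (zp.map Prod.snd)

def edge_sym (cs : List Char) (i : Int) (after_index : Bool) : Bool :=
  let i := if after_index then (if i == (cs.length : Int) - 1 then (0 : Int) else i + 1) else i
  let left := cs ++ PySem.List.slice cs none (some i)
  let right := PySem.List.slice cs (some i) none ++ cs
  let zp := left.reverse.zip right
  (zp.map Prod.fst) == (zp.map Prod.snd)

-- s[i1] and s[i2] are ported with pyGetD: at those points 0 ≤ i1 < i2 < n, so Python never raises.
def symmetry (s : String) : Int × List String × List String × List String :=
  let cs := s.toList
  let n : Int := cs.length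
  if PySem.Int.mod n 2 == 1 then
    let r := (PySem.List.enumerate cs 0).foldl
      (fun (acc : Int × List String) (ic : Int × Char) =>
        let i := ic.1
        let ch := ic.2
        if vertex_sym cs i then
          let j := PySem.Int.mod (i + PySem.Int.floordiv n 2 + 1) n
          let cls :=
            if j < i then
              String.ofList (PySem.List.slice cs none (some j) ++ ['|'] ++ PySem.List.slice cs (some j) (some i)
                ++ ['('] ++ [ch] ++ [')'] ++ PySem.List.slice cs (some (i + 1)) none)
            else
              String.ofList (PySem.List.slice cs none (some i) ++ ['('] ++ [ch] ++ [')']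
                ++ PySem.List.slice cs (some (i + 1)) (some j) ++ ['|'] ++ PySem.List.slice cs (some j) none)
          (acc.1 + 1, acc.2 ++ [cls])
        else acc)
      (0, [])
    (r.1, r.2, [], [])
  else
    let r := (PySem.List.pyRange 0 (PySem.Int.floordiv n 2)).foldl
      (fun (acc : Int × List String × List String) (i : Int) =>
        let i1 := PySem.Int.mod (i + PySem.Int.floordiv n 2) n
        let i2 := i
        let p := if i1 > i2 then (i2, i1) else (i1, i2)
        let i1 := p.1
        let i2 := p.2
        let acc :=
          if vertex_sym cs i then
            (acc.1 + 1,
             acc.2.1 ++ [String.ofList (PySem.List.slice cs none (some i1) ++ ['('] ++ [PySem.List.pyGetD cs i1 ' '] ++ [')']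
               ++ PySem.List.slice cs (some (i1 + 1)) (some i2) ++ ['('] ++ [PySem.List.pyGetD cs i2 ' '] ++ [')']
               ++ PySem.List.slice cs (some (i2 + 1)) none)],
             acc.2.2)
          else acc
        if edge_sym cs i false then
          (acc.1 + 1, acc.2.1,
           acc.2.2 ++ [String.ofList (PySem.List.slice cs none (some i1) ++ ['|'] ++ PySem.List.slice cs (some i1) (some i2)
             ++ ['|'] ++ PySem.List.slice cs (some i2) none)])
        else acc)
      (0, [], [])
    (r.1, [], r.2.1, r.2.2)

-- ===== PORT B =====
-- occList xs is B's table `occ`: occ[k] = (d[k:k+m] == rev) with d = s+s, rev = s[::-1].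
-- `s[::-1]` is reversal (PySem.List.slice?_none_none_neg_one). B's slice bounds are all
-- nonnegative, where Python slicing is exactly clamped drop/take (PySem.List.slice_toNat /
-- slice_to / slice_from), so they are ported as List.take/List.drop with .toNat; B's
-- character indices s[...] are in range and ported with pyGetD.
def occList (xs : List Char) : List Bool :=
  (PySem.List.pyRange 0 (xs.length : Int)).map
    (fun k => List.take xs.length (List.drop k.toNat (xs ++ xs)) == xs.reverse)

def symmetry_alt (s : String) : Int × List String × List String × List String :=
  let xs := s.toList
  let m : Int := xs.length
  let occ := occList xs
  if PySem.Int.mod m 2 == 1 then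
    let hits := (PySem.List.pyRange 0 m).filter
      (fun k => PySem.List.pyGetD occ (PySem.Int.mod (2 * k + 1) m) false)
    let class1 := hits.map (fun k =>
      let c := PySem.Int.mod (k + PySem.Int.floordiv m 2 + 1) m
      if c < k then
        String.ofList (List.take c.toNat xs ++ '|' ::
          (List.take (k.toNat - c.toNat) (List.drop c.toNat xs) ++ '(' ::
            PySem.List.pyGetD xs k ' ' :: ')' :: List.drop (k + 1).toNat xs))
      else
        String.ofList (List.take k.toNat xs ++ '(' ::
          PySem.List.pyGetD xs k ' ' :: ')' ::
          (List.take (c.toNat - (k + 1).toNat) (List.drop (k + 1).toNat xs) ++ '|' ::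
            List.drop c.toNat xs)))
    ((hits.length : Int), class1, [], [])
  else
    let half := PySem.Int.floordiv m 2
    let vhits := (PySem.List.pyRange 0 half).filter
      (fun k => PySem.List.pyGetD occ (PySem.Int.mod (2 * k + 1) m) false)
    let ehits := (PySem.List.pyRange 0 half).filter
      (fun k => PySem.List.pyGetD occ (PySem.Int.mod (2 * k) m) false)
    let class2 := vhits.map (fun k =>
      String.ofList (List.take k.toNat xs ++ '(' ::
        PySem.List.pyGetD xs k ' ' :: ')' ::
        (List.take ((k + half).toNat - (k + 1).toNat) (List.drop (k + 1).toNat xs) ++ '(' ::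
          PySem.List.pyGetD xs (k + half) ' ' :: ')' :: List.drop (k + half + 1).toNat xs)))
    let class3 := ehits.map (fun k =>
      String.ofList (List.take k.toNat xs ++ '|' ::
        (List.take ((k + half).toNat - k.toNat) (List.drop k.toNat xs) ++ '|' ::
          List.drop (k + half).toNat xs)))
    ((vhits.length : Int) + (ehits.length : Int), [], class2, class3)

-- ===== PRECONDITION & SPEC =====
def Spec_symmetry (s : String) (out : Int × List String × List String × List String) : Prop := out = symmetry_alt s
instance (s : String) (out : Int × List String × List String × List String) : Decidable (Spec_symmetry s out) := by unfold Spec_symmetry; infer_instance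

-- ===== CLAIM (what is proved, stated in full; the proofs are below) =====
def Claim_equal_symmetry : Prop := ∀ (s : String), Dom_symmetry s → Spec_symmetry s (symmetry s)

-- ===== LEMMAS AND PROOFS =====

-- `G cs a` is the character of the cycle cs at Python-mod position a % n.
def G (cs : List Char) (a : Int) : Char := cs.getD (PySem.Int.mod a cs.length).toNat ' '

theorem G_congr (cs : List Char) {a b : Int} (h : ((cs.length : Int)) ∣ a - b) : G cs a = G cs b := by
  rcases Nat.eq_zero_or_pos cs.length with h0 | h0
  · have hab : a = b := by
      rw [h0] at h
      have h2 : a - b = 0 := zero_dvd_iff.mp (by exact_mod_cast h)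
      omega
    rw [hab]
  · have hpos : (0:Int) < cs.length := by exact_mod_cast h0
    have hmod : a % (cs.length:Int) = b % (cs.length:Int) := by
      have : Int.ModEq (cs.length:Int) a b := by
        refine (Int.modEq_iff_dvd.mpr ?_)
        obtain ⟨z, hz⟩ := h
        exact ⟨-z, by linarith⟩
      exact this
    unfold G
    rw [PySem.Int.mod_eq_emod_of_pos hpos, PySem.Int.mod_eq_emod_of_pos hpos, hmod]

theorem G_nat_lt (cs : List Char) {p : Nat} (hp : p < cs.length) : G cs (p : Int) = cs.getD p ' ' := by
  have hpos : (0:Int) < cs.length := by exact_mod_cast Nat.lt_of_le_of_lt (Nat.zero_le p) hp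
  unfold G
  rw [PySem.Int.mod_eq_emod_of_pos hpos, Int.emod_eq_of_lt (by positivity) (by exact_mod_cast hp)]
  simp

theorem left_getD (cs : List Char) (iN x : Nat) (hiN : iN ≤ cs.length) (hx : x < cs.length + iN) :
    (cs ++ cs.take iN).getD x ' ' = G cs (x : Int) := by
  rcases lt_or_ge x cs.length with h | h
  · rw [List.getD_append _ _ _ _ h, G_nat_lt cs h]
  · have hlt : x - cs.length < (cs.take iN).length := by simp [List.length_take]; omega
    rw [List.getD_append_right _ _ _ _ h, List.getD_eq_getElem _ _ hlt, List.getElem_take,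
      ← List.getD_eq_getElem cs ' ' (by omega : x - cs.length < cs.length),
      ← G_nat_lt cs (by omega : x - cs.length < cs.length)]
    exact G_congr cs ⟨-1, by omega⟩

theorem right_getD (cs : List Char) (j k : Nat) (hj : j ≤ cs.length) (hk : k < 2 * cs.length - j) :
    (cs.drop j ++ cs).getD k ' ' = G cs ((j : Int) + (k : Int)) := by
  rcases lt_or_ge k (cs.length - j) with h | h
  · have hlt : k < (cs.drop j).length := by simp [List.length_drop]; omega
    rw [List.getD_append _ _ _ _ hlt, List.getD_eq_getElem _ _ hlt, List.getElem_drop,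
      ← List.getD_eq_getElem cs ' ' (by omega : j + k < cs.length),
      ← G_nat_lt cs (by omega : j + k < cs.length)]
    exact G_congr cs ⟨0, by omega⟩
  · have h2 : (cs.drop j).length ≤ k := by simp [List.length_drop]; omega
    rw [List.getD_append_right _ _ _ _ h2]
    have hx : k - (cs.drop j).length = k - (cs.length - j) := by simp [List.length_drop]
    rw [hx, ← G_nat_lt cs (by omega : k - (cs.length - j) < cs.length)]
    exact G_congr cs ⟨-1, by omega⟩

theorem map_zip_eq_iff (l r : List Char) :
    (((l.zip r).map Prod.fst) == ((l.zip r).map Prod.snd)) = true ↔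
      ∀ k : Nat, k < min l.length r.length → l.getD k ' ' = r.getD k ' ' := by
  rw [beq_iff_eq]
  constructor
  · intro h k hk
    have h1 : k < ((l.zip r).map Prod.fst).length := by simp [hk]
    have h2 : k < ((l.zip r).map Prod.snd).length := by simp [hk]
    have := List.getElem_of_eq h (i := k) h1
    simp [List.getElem_zip] at this
    rwa [List.getD_eq_getElem _ _ (by omega : k < l.length),
      List.getD_eq_getElem _ _ (by omega : k < r.length)]
  · intro h
    apply List.ext_getElem (by simp)
    intro k h1 h2
    simp only [List.getElem_map, List.getElem_zip]
    have hk : k < min l.length r.length := by simpa using h1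
    have := h k hk
    rwa [List.getD_eq_getElem _ _ (by omega : k < l.length),
      List.getD_eq_getElem _ _ (by omega : k < r.length)] at this

theorem revappend_getD (cs : List Char) (iN k : Nat) (hiN : iN ≤ cs.length) (hk : k < cs.length + iN) :
    (cs ++ cs.take iN).reverse.getD k ' ' = G cs ((cs.length : Int) + (iN : Int) - 1 - (k : Int)) := by
  have hL : (cs ++ cs.take iN).length = cs.length + iN := by
    simp [List.length_take]; omega
  have hk2 : k < (cs ++ cs.take iN).reverse.length := by simp; omega
  rw [List.getD_eq_getElem _ _ hk2, List.getElem_reverse, ← List.getD_eq_getElem _ ' ',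
    hL]
  rw [left_getD cs iN (cs.length + iN - 1 - k) hiN (by omega)]
  exact G_congr cs ⟨0, by omega⟩

theorem zipcheck_iff (cs : List Char) (iN e : Nat) (hn : 0 < cs.length) (hi : iN < cs.length) (hie : iN + e ≤ cs.length)
    (T : Int) (hT : T = 2 * (iN : Int) + (e : Int) - 1) :
    ((((cs ++ cs.take iN).reverse.zip (cs.drop (iN + e) ++ cs)).map Prod.fst) ==
     (((cs ++ cs.take iN).reverse.zip (cs.drop (iN + e) ++ cs)).map Prod.snd)) = true ↔
      ∀ p : Nat, p < cs.length → cs.getD p ' ' = G cs (T - (p : Int)) := by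
  have hiN : iN ≤ cs.length := le_of_lt hi
  have hnI : (0:Int) < cs.length := by exact_mod_cast hn
  have hL : (cs ++ cs.take iN).reverse.length = cs.length + iN := by
    simp [List.length_take]; omega
  have hR : (cs.drop (iN + e) ++ cs).length = 2 * cs.length - (iN + e) := by
    simp [List.length_drop]; omega
  rw [map_zip_eq_iff, hL, hR]
  have hm : cs.length ≤ min (cs.length + iN) (2 * cs.length - (iN + e)) := by omega
  have hpt : ∀ k : Nat, k < min (cs.length + iN) (2 * cs.length - (iN + e)) →
      (((cs ++ cs.take iN).reverse.getD k ' ' = (cs.drop (iN + e) ++ cs).getD k ' ') ↔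
        (G cs ((cs.length : Int) + (iN : Int) - 1 - (k : Int)) = G cs (((iN + e : Nat) : Int) + (k : Int)))) := by
    intro k hk
    rw [revappend_getD cs iN k hiN (by omega), right_getD cs (iN + e) k hie (by omega)]
  constructor
  · intro h p hp
    have hk0 : 0 ≤ ((cs.length : Int) + iN - 1 - p) % (cs.length : Int) :=
      Int.emod_nonneg _ (by omega)
    have hkn : ((cs.length : Int) + iN - 1 - p) % (cs.length : Int) < (cs.length : Int) :=
      Int.emod_lt_of_pos _ hnI
    have hkc : ((((((cs.length : Int) + iN - 1 - p) % (cs.length : Int))).toNat : Int))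
        = ((cs.length : Int) + iN - 1 - p) % (cs.length : Int) := Int.toNat_of_nonneg hk0
    have hkm : ((((cs.length : Int) + iN - 1 - p) % (cs.length : Int))).toNat
        < min (cs.length + iN) (2 * cs.length - (iN + e)) := by omega
    have hA := (hpt _ hkm).mp (h _ hkm)
    calc cs.getD p ' ' = G cs (p : Int) := (G_nat_lt cs hp).symm
      _ = G cs ((cs.length : Int) + iN - 1 - (((((cs.length : Int) + iN - 1 - p) % (cs.length : Int))).toNat : Int)) :=
          G_congr cs ⟨-(((cs.length : Int) + iN - 1 - p) / (cs.length : Int)), by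
            rw [hkc, Int.emod_def]; ring⟩
      _ = G cs (((iN + e : Nat) : Int) + (((((cs.length : Int) + iN - 1 - p) % (cs.length : Int))).toNat : Int)) := hA
      _ = G cs (T - (p : Int)) :=
          G_congr cs ⟨1 - ((cs.length : Int) + iN - 1 - p) / (cs.length : Int), by
            rw [hkc, Int.emod_def, hT]; push_cast; ring⟩
  · intro h k hk
    refine (hpt k hk).mpr ?_
    have hp0 : 0 ≤ (((iN + e : Nat) : Int) + k) % (cs.length : Int) :=
      Int.emod_nonneg _ (by omega)
    have hpn : (((iN + e : Nat) : Int) + k) % (cs.length : Int) < (cs.length : Int) :=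
      Int.emod_lt_of_pos _ hnI
    have hpc : ((((((iN + e : Nat) : Int) + k) % (cs.length : Int)).toNat : Int))
        = (((iN + e : Nat) : Int) + k) % (cs.length : Int) := Int.toNat_of_nonneg hp0
    have hpln : ((((iN + e : Nat) : Int) + k) % (cs.length : Int)).toNat < cs.length := by omega
    have hB := h _ hpln
    calc G cs ((cs.length : Int) + iN - 1 - (k : Int))
        = G cs (T - ((((((iN + e : Nat) : Int) + k) % (cs.length : Int)).toNat : Int))) :=
          G_congr cs ⟨1 - (((iN + e : Nat) : Int) + k) / (cs.length : Int), by
            rw [hpc, Int.emod_def, hT]; push_cast; ring⟩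
      _ = cs.getD (((((iN + e : Nat) : Int) + k) % (cs.length : Int)).toNat) ' ' := hB.symm
      _ = G cs ((((((iN + e : Nat) : Int) + k) % (cs.length : Int)).toNat : Int)) := (G_nat_lt cs hpln).symm
      _ = G cs (((iN + e : Nat) : Int) + (k : Int)) :=
          G_congr cs ⟨-((((iN + e : Nat) : Int) + k) / (cs.length : Int)), by
            rw [hpc, Int.emod_def]; ring⟩

theorem enumerate_eq0 (cs : List Char) (st : Int) :
    PySem.List.enumerate cs st = (List.range cs.length).map (fun (k : Nat) => (st + (k : Int), cs.getD k ' ')) := by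
  induction cs generalizing st with
  | nil => simp [PySem.List.enumerate]
  | cons c cs ih =>
    rw [PySem.List.enumerate]
    simp only [List.length_cons, List.range_succ_eq_map, List.map_cons, List.map_map]
    rw [ih]
    refine congrArg₂ List.cons (by simp) ?_
    refine List.map_congr_left fun k hk => ?_
    simp only [Function.comp, List.getD_cons_succ, Prod.mk.injEq]
    exact ⟨by push_cast; ring, trivial⟩

theorem enumerate_eq1 (cs : List Char) :
    PySem.List.enumerate cs 0 = (List.range cs.length).map (fun (k : Nat) => ((k : Int), cs.getD k ' ')) := by
  rw [enumerate_eq0]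
  exact List.map_congr_left fun k _ => by simp

-- A's per-axis checks, characterised on the cycle.
theorem vertex_sym_iff (cs : List Char) {iN : Nat} (hi : iN < cs.length) :
    vertex_sym cs (iN : Int) = true ↔
      ∀ p : Nat, p < cs.length → cs.getD p ' ' = G cs (2 * (iN : Int) - (p : Int)) := by
  have hn : 0 < cs.length := Nat.lt_of_le_of_lt (Nat.zero_le _) hi
  have hs1 : PySem.List.slice cs none (some (iN : Int)) = cs.take iN := by
    rw [PySem.List.slice_to cs (by positivity)]; simp
  have hs2 : PySem.List.slice cs (some ((iN : Int) + 1)) none = cs.drop (iN + 1) := by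
    rw [PySem.List.slice_from cs (by positivity),
      show ((iN : Int) + 1).toNat = iN + 1 from by omega]
  show (let left := cs ++ PySem.List.slice cs none (some (iN : Int));
        let right := PySem.List.slice cs (some ((iN : Int) + 1)) none ++ cs;
        let zp := left.reverse.zip right;
        ((zp.map Prod.fst) == (zp.map Prod.snd))) = true ↔ _
  simp only [hs1, hs2]
  exact zipcheck_iff cs iN 1 hn hi (by omega) (2 * (iN : Int)) (by push_cast; ring)

theorem edge_sym_iff (cs : List Char) {iN : Nat} (hi : iN < cs.length) :
    edge_sym cs (iN : Int) false = true ↔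
      ∀ p : Nat, p < cs.length → cs.getD p ' ' = G cs (2 * (iN : Int) - 1 - (p : Int)) := by
  have hn : 0 < cs.length := Nat.lt_of_le_of_lt (Nat.zero_le _) hi
  have hs1 : PySem.List.slice cs none (some (iN : Int)) = cs.take iN := by
    rw [PySem.List.slice_to cs (by positivity)]; simp
  have hs2 : PySem.List.slice cs (some (iN : Int)) none = cs.drop iN := by
    rw [PySem.List.slice_from cs (by positivity)]; simp
  show (let i := if (false : Bool) then (if (iN : Int) == (cs.length : Int) - 1 then (0 : Int) else (iN : Int) + 1) else (iN : Int);
        let left := cs ++ PySem.List.slice cs none (some i);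
        let right := PySem.List.slice cs (some i) none ++ cs;
        let zp := left.reverse.zip right;
        ((zp.map Prod.fst) == (zp.map Prod.snd))) = true ↔ _
  simp only [Bool.false_eq_true, if_false, hs1, hs2]
  have hz := zipcheck_iff cs iN 0 hn hi (by omega) (2 * (iN : Int) - 1) (by push_cast; ring)
  simp only [Nat.add_zero] at hz
  rw [hz]

-- B's table entry, characterised on the cycle.
theorem occ_getD (cs : List Char) (k : Nat) (hk : k < cs.length) :
    PySem.List.pyGetD (occList cs) ((k : Int)) false
      = (List.take cs.length (List.drop k (cs ++ cs)) == cs.reverse) := by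
  unfold occList
  rw [PySem.List.pyGetD_map_pyRange _ cs.length k false hk, Int.toNat_natCast]

theorem dtake_char (cs : List Char) (k : Nat) (hk : k < cs.length) :
    (List.take cs.length (List.drop k (cs ++ cs)) == cs.reverse) = true ↔
      ∀ j : Nat, j < cs.length → G cs ((k : Int) + (j : Int)) = cs.getD (cs.length - 1 - j) ' ' := by
  have hdrop : List.drop k (cs ++ cs) = cs.drop k ++ cs := by
    rw [List.drop_append, Nat.sub_eq_zero_of_le (le_of_lt hk), List.drop_zero]
  have hlen : (cs.drop k ++ cs).length = 2 * cs.length - k := by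
    simp [List.length_drop]; omega
  rw [hdrop, beq_iff_eq]
  constructor
  · intro h j hj
    have h1 : j < (List.take cs.length (cs.drop k ++ cs)).length := by
      simp [List.length_take]; omega
    have := List.getElem_of_eq h (i := j) h1
    rw [List.getElem_take, List.getElem_reverse] at this
    rw [← List.getD_eq_getElem (cs.drop k ++ cs) ' ' (by omega : j < (cs.drop k ++ cs).length)] at this
    rw [right_getD cs k j (le_of_lt hk) (by omega)] at this
    rw [this, List.getD_eq_getElem cs ' ' (by omega : cs.length - 1 - j < cs.length)]
  · intro h
    apply List.ext_getElem (by simp [List.length_take])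
    intro j h1 h2
    rw [List.getElem_take, List.getElem_reverse]
    have hj : j < cs.length := by simpa using h2
    rw [← List.getD_eq_getElem (cs.drop k ++ cs) ' ' (by omega : j < (cs.drop k ++ cs).length),
      right_getD cs k j (le_of_lt hk) (by omega), h j hj,
      List.getD_eq_getElem cs ' ' (by omega : cs.length - 1 - j < cs.length)]

-- Shifting the occurrence condition at offset k ≡ t+1 (mod n) to A's axis condition at t.
theorem cond_shift (cs : List Char) (t : Int) (k : Nat)
    (hdvd : ((cs.length : Int)) ∣ (k : Int) - (t + 1)) :
    (∀ j : Nat, j < cs.length → G cs ((k : Int) + (j : Int)) = cs.getD (cs.length - 1 - j) ' ') ↔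
      (∀ p : Nat, p < cs.length → cs.getD p ' ' = G cs (t - (p : Int))) := by
  obtain ⟨z, hz⟩ := hdvd
  constructor
  · intro h p hp
    have hj : cs.length - 1 - p < cs.length := by omega
    have := h (cs.length - 1 - p) hj
    have hq : cs.length - 1 - (cs.length - 1 - p) = p := by omega
    rw [hq] at this
    rw [← this]
    refine (G_congr cs ⟨-z - 1, ?_⟩).symm
    push_cast [show ((cs.length - 1 - p : Nat) : Int) = (cs.length : Int) - 1 - p from by omega]
    linarith [hz]
  · intro h j hj
    have hp : cs.length - 1 - j < cs.length := by omega
    rw [h (cs.length - 1 - j) hp]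
    refine G_congr cs ⟨z + 1, ?_⟩
    push_cast [show ((cs.length - 1 - j : Nat) : Int) = (cs.length : Int) - 1 - j from by omega]
    linarith [hz]

theorem occB_vertex (cs : List Char) {k : Nat} (hk : k < cs.length) :
    PySem.List.pyGetD (occList cs) (PySem.Int.mod (2 * (k : Int) + 1) (cs.length : Int)) false
      = vertex_sym cs (k : Int) := by
  have hn : 0 < cs.length := Nat.lt_of_le_of_lt (Nat.zero_le _) hk
  have hcast : (2 * (k : Int) + 1) = ((2 * k + 1 : Nat) : Int) := by push_cast; ring
  rw [hcast, PySem.Int.mod_natCast]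
  have hm : (2 * k + 1) % cs.length < cs.length := Nat.mod_lt _ hn
  rw [occ_getD cs _ hm, Bool.eq_iff_iff, dtake_char cs _ hm,
    cond_shift cs (2 * (k : Int)) _
      ⟨-(((2 * k + 1) / cs.length : Nat) : Int), by
        have := Nat.div_add_mod (2 * k + 1) cs.length
        push_cast at this ⊢
        linarith⟩,
    ← vertex_sym_iff cs hk]

theorem occB_edge (cs : List Char) {k : Nat} (hk : k < cs.length) :
    PySem.List.pyGetD (occList cs) (PySem.Int.mod (2 * (k : Int)) (cs.length : Int)) false
      = edge_sym cs (k : Int) false := by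
  have hn : 0 < cs.length := Nat.lt_of_le_of_lt (Nat.zero_le _) hk
  have hcast : (2 * (k : Int)) = ((2 * k : Nat) : Int) := by push_cast; ring
  rw [hcast, PySem.Int.mod_natCast]
  have hm : (2 * k) % cs.length < cs.length := Nat.mod_lt _ hn
  rw [occ_getD cs _ hm, Bool.eq_iff_iff, dtake_char cs _ hm,
    cond_shift cs (2 * (k : Int) - 1) _
      ⟨-(((2 * k) / cs.length : Nat) : Int), by
        have := Nat.div_add_mod (2 * k) cs.length
        push_cast at this ⊢
        linarith⟩,
    ← edge_sym_iff cs hk]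

-- A fold that conditionally counts and appends is the (filter, map) decomposition.
theorem foldl_filter_map {α β : Type} (l : List α) (p : α → Bool) (f : α → β)
    (a : Int) (acc : List β) :
    l.foldl (fun (acc : Int × List β) x => if p x then (acc.1 + 1, acc.2 ++ [f x]) else acc) (a, acc)
      = (a + ((l.filter p).length : Int), acc ++ (l.filter p).map f) := by
  induction l generalizing a acc with
  | nil => simp
  | cons x xs ih =>
    simp only [List.foldl_cons]
    by_cases hx : p x = true
    · simp only [hx, if_true, ih, List.filter_cons_of_pos hx, List.length_cons, List.map_cons,
        Prod.mk.injEq]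
      exact ⟨by push_cast; ring, by simp⟩
    · have hx' : p x = false := by simpa using hx
      simp [hx', ih]
theorem foldl_two {α β : Type} (l : List α) (p q : α → Bool) (f g : α → β)
    (a : Int) (acc2 acc3 : List β) :
    l.foldl (fun (acc : Int × List β × List β) x =>
        let acc := if p x then (acc.1 + 1, acc.2.1 ++ [f x], acc.2.2) else acc
        if q x then (acc.1 + 1, acc.2.1, acc.2.2 ++ [g x]) else acc) (a, acc2, acc3)
      = (a + ((l.filter p).length : Int) + ((l.filter q).length : Int),
         acc2 ++ (l.filter p).map f, acc3 ++ (l.filter q).map g) := by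
  induction l generalizing a acc2 acc3 with
  | nil => simp
  | cons x xs ih =>
    simp only [List.foldl_cons]
    by_cases hp : p x = true <;> by_cases hq : q x = true <;>
      simp [hp, hq, ih, Prod.ext_iff] <;> omega

theorem symmetry_eq_alt (s : String) : symmetry s = symmetry_alt s := by
  unfold symmetry symmetry_alt
  dsimp only
  by_cases hpar : (PySem.Int.mod (s.toList.length : Int) 2 == 1) = true
  · rw [if_pos hpar, if_pos hpar]
    set cs := s.toList with hcs
    have hfold :
        (PySem.List.enumerate cs 0).foldl
          (fun (acc : Int × List String) (ic : Int × Char) =>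
            let i := ic.1
            let ch := ic.2
            if vertex_sym cs i then
              let j := PySem.Int.mod (i + PySem.Int.floordiv (cs.length : Int) 2 + 1) (cs.length : Int)
              let cls :=
                if j < i then
                  String.ofList (PySem.List.slice cs none (some j) ++ ['|'] ++ PySem.List.slice cs (some j) (some i)
                    ++ ['('] ++ [ch] ++ [')'] ++ PySem.List.slice cs (some (i + 1)) none)
                else
                  String.ofList (PySem.List.slice cs none (some i) ++ ['('] ++ [ch] ++ [')']
                    ++ PySem.List.slice cs (some (i + 1)) (some j) ++ ['|'] ++ PySem.List.slice cs (some j) none)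
              (acc.1 + 1, acc.2 ++ [cls])
            else acc)
          (0, [])
        = (PySem.List.pyRange 0 ((cs.length : Int))).foldl
          (fun (acc : Int × List String) (i : Int) =>
            if PySem.List.pyGetD (occList cs) (PySem.Int.mod (2 * i + 1) (cs.length : Int)) false then
              (acc.1 + 1, acc.2 ++
                [(fun k =>
                  let c := PySem.Int.mod (k + PySem.Int.floordiv (cs.length : Int) 2 + 1) (cs.length : Int)
                  if c < k then
                    String.ofList (List.take c.toNat cs ++ '|' ::
                      (List.take (k.toNat - c.toNat) (List.drop c.toNat cs) ++ '(' ::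
                        PySem.List.pyGetD cs k ' ' :: ')' :: List.drop (k + 1).toNat cs))
                  else
                    String.ofList (List.take k.toNat cs ++ '(' ::
                      PySem.List.pyGetD cs k ' ' :: ')' ::
                      (List.take (c.toNat - (k + 1).toNat) (List.drop (k + 1).toNat cs) ++ '|' ::
                        List.drop c.toNat cs))) i])
            else acc)
          (0, []) := by
      rw [enumerate_eq1, PySem.List.pyRange_zero_natCast, List.foldl_map, List.foldl_map]
      refine PySem.List.foldl_congr_mem _ _ _ _ ?_
      intro acc k hk
      have hklt : k < cs.length := List.mem_range.mp hk
      have hn0 : (0:Int) < (cs.length : Int) := by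
        exact_mod_cast Nat.lt_of_le_of_lt (Nat.zero_le _) hklt
      have hj0 : (0:Int) ≤ PySem.Int.mod ((k:Int) + PySem.Int.floordiv (cs.length : Int) 2 + 1) (cs.length : Int) :=
        PySem.Int.mod_nonneg _ hn0
      dsimp only
      rw [occB_vertex cs hklt,
        PySem.List.pyGetD_of_nonneg cs ' ' (by positivity : (0:Int) ≤ (k : Int)),
        PySem.List.slice_to cs hj0,
        PySem.List.slice_to cs (by positivity : (0:Int) ≤ (k : Int)),
        PySem.List.slice_toNat cs hj0 (by positivity : (0:Int) ≤ (k : Int)),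
        PySem.List.slice_toNat cs (by positivity : (0:Int) ≤ (k : Int) + 1) hj0,
        PySem.List.slice_from cs hj0,
        PySem.List.slice_from cs (by positivity : (0:Int) ≤ (k : Int) + 1)]
      simp only [List.append_assoc, List.cons_append, List.nil_append, Int.toNat_natCast]
    rw [hfold,
      foldl_filter_map (PySem.List.pyRange 0 ((cs.length : Int)))
        (fun i => PySem.List.pyGetD (occList cs) (PySem.Int.mod (2 * i + 1) (cs.length : Int)) false) _ 0 []]
    simp only [zero_add, List.nil_append]
  · rw [if_neg hpar, if_neg hpar]
    set cs := s.toList with hcs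
    have hfd : PySem.Int.floordiv (cs.length : Int) 2 = ((cs.length / 2 : Nat) : Int) := by
      exact_mod_cast PySem.Int.floordiv_natCast cs.length 2
    have hfold :
        (PySem.List.pyRange 0 (PySem.Int.floordiv (cs.length : Int) 2)).foldl
          (fun (acc : Int × List String × List String) (i : Int) =>
            let i1 := PySem.Int.mod (i + PySem.Int.floordiv (cs.length : Int) 2) (cs.length : Int)
            let i2 := i
            let p := if i1 > i2 then (i2, i1) else (i1, i2)
            let i1 := p.1
            let i2 := p.2
            let acc :=
              if vertex_sym cs i then
                (acc.1 + 1,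
                 acc.2.1 ++ [String.ofList (PySem.List.slice cs none (some i1) ++ ['('] ++ [PySem.List.pyGetD cs i1 ' '] ++ [')']
                   ++ PySem.List.slice cs (some (i1 + 1)) (some i2) ++ ['('] ++ [PySem.List.pyGetD cs i2 ' '] ++ [')']
                   ++ PySem.List.slice cs (some (i2 + 1)) none)],
                 acc.2.2)
              else acc
            if edge_sym cs i false then
              (acc.1 + 1, acc.2.1,
               acc.2.2 ++ [String.ofList (PySem.List.slice cs none (some i1) ++ ['|'] ++ PySem.List.slice cs (some i1) (some i2)
                 ++ ['|'] ++ PySem.List.slice cs (some i2) none)])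
            else acc)
          (0, [], [])
        = (PySem.List.pyRange 0 (PySem.Int.floordiv (cs.length : Int) 2)).foldl
          (fun (acc : Int × List String × List String) (i : Int) =>
            let acc :=
              if PySem.List.pyGetD (occList cs) (PySem.Int.mod (2 * i + 1) (cs.length : Int)) false then
                (acc.1 + 1,
                 acc.2.1 ++
                  [(fun k => String.ofList (List.take k.toNat cs ++ '(' ::
                    PySem.List.pyGetD cs k ' ' :: ')' ::
                    (List.take ((k + PySem.Int.floordiv (cs.length : Int) 2).toNat - (k + 1).toNat)
                        (List.drop (k + 1).toNat cs) ++ '(' ::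
                      PySem.List.pyGetD cs (k + PySem.Int.floordiv (cs.length : Int) 2) ' ' :: ')' ::
                      List.drop (k + PySem.Int.floordiv (cs.length : Int) 2 + 1).toNat cs))) i],
                 acc.2.2)
              else acc
            if PySem.List.pyGetD (occList cs) (PySem.Int.mod (2 * i) (cs.length : Int)) false then
              (acc.1 + 1, acc.2.1,
               acc.2.2 ++
                [(fun k => String.ofList (List.take k.toNat cs ++ '|' ::
                  (List.take ((k + PySem.Int.floordiv (cs.length : Int) 2).toNat - k.toNat)
                      (List.drop k.toNat cs) ++ '|' ::
                    List.drop (k + PySem.Int.floordiv (cs.length : Int) 2).toNat cs))) i])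
            else acc)
          (0, [], []) := by
      rw [hfd, PySem.List.pyRange_zero_natCast, List.foldl_map, List.foldl_map]
      refine PySem.List.foldl_congr_mem _ _ _ _ ?_
      intro acc k hk
      have hk2 : k < cs.length / 2 := List.mem_range.mp hk
      have hklt : k < cs.length := by omega
      have hn : 0 < cs.length := by omega
      dsimp only
      have hmod : PySem.Int.mod ((k : Int) + ((cs.length / 2 : Nat) : Int)) (cs.length : Int)
          = (k : Int) + ((cs.length / 2 : Nat) : Int) := by
        rw [PySem.Int.mod_eq_emod_of_pos (by exact_mod_cast hn)]
        rw [Int.emod_eq_of_lt (by positivity) (by push_cast; omega)]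
      rw [hmod, if_pos (show ((k : Int) + ((cs.length / 2 : Nat) : Int)) > (k : Int) by push_cast; omega)]
      dsimp only
      rw [occB_vertex cs hklt, occB_edge cs hklt,
        PySem.List.slice_to cs (by positivity : (0:Int) ≤ (k : Int)),
        PySem.List.slice_toNat cs (by positivity : (0:Int) ≤ (k : Int) + 1)
          (by positivity : (0:Int) ≤ (k : Int) + ((cs.length / 2 : Nat) : Int)),
        PySem.List.slice_from cs (by positivity : (0:Int) ≤ (k : Int) + ((cs.length / 2 : Nat) : Int) + 1),
        PySem.List.slice_toNat cs (by positivity : (0:Int) ≤ (k : Int))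
          (by positivity : (0:Int) ≤ (k : Int) + ((cs.length / 2 : Nat) : Int)),
        PySem.List.slice_from cs (by positivity : (0:Int) ≤ (k : Int) + ((cs.length / 2 : Nat) : Int))]
      simp only [List.append_assoc, List.cons_append, List.nil_append, Int.toNat_natCast]
    rw [hfold,
      foldl_two (PySem.List.pyRange 0 (PySem.Int.floordiv (cs.length : Int) 2))
        (fun i => PySem.List.pyGetD (occList cs) (PySem.Int.mod (2 * i + 1) (cs.length : Int)) false)
        (fun i => PySem.List.pyGetD (occList cs) (PySem.Int.mod (2 * i) (cs.length : Int)) false)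
        _ _ 0 [] []]
    simp only [zero_add, List.nil_append]

-- ===== VERDICT (by name: the statement is the Claim_ definition above) =====
theorem symmetry_spec : Claim_equal_symmetry := by
  intro s _
  unfold Spec_symmetry
  exact symmetry_eq_alt s
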